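-- pv_equiv track=rewrite | github.com/729149195/DataDiagnosticPlatform | RunDetectAlgorithm/combine_db.py | find_intervals
-- ===== SOURCE A (Python) =====
-- def find_intervals(numbers):
--     """将数字列表转为区间字符串"""
--     numbers = sorted(set(numbers))
--     if not numbers:
--         return ""
--     intervals = []
--     start = prev = numbers[0]
--     for n in numbers[1:]:
--         if n == prev + 1:
--             prev = n
--         else:
--             intervals.append(f"[{start}_{prev}]")
--             start = prev = n
--     intervals.append(f"[{start}_{prev}]")
--     return "_".join(intervals)
-- ===== SOURCE B (Python) =====
-- def find_intervals(numbers):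
--     """将数字列表转为区间字符串"""
--     s = set(numbers)
--     starts = sorted(x for x in s if x - 1 not in s)
--     ends = sorted(x for x in s if x + 1 not in s)
--     return "_".join(f"[{a}_{b}]" for a, b in zip(starts, ends))
-- ===== Notes on version B (the rewrite author's own statement) =====
-- stated objective: alternative
-- what changed: A's single sorted scan carrying start/prev accumulators is replaced by a set-membership boundary characterization: an element starts a run iff x-1 is not in the set and ends one iff x+1 is not, so the result is the zip of the sorted run-starts with the sorted run-ends, with no consecutive scan at all.
import Mathlib
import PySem

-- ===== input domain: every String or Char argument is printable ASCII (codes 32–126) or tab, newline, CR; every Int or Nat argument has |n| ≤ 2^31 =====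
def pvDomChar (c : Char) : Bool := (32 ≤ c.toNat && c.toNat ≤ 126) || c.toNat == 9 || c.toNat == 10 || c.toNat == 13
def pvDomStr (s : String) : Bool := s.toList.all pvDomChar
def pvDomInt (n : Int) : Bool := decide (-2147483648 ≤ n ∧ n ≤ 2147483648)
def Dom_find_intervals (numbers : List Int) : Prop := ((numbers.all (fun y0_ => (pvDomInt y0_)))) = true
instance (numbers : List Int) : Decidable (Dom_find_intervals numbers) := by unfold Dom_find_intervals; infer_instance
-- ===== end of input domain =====

-- B replaces A's sorted scan with start/prev accumulators by a set-membership boundary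
-- characterization (x starts a run iff x-1 ∉ set, ends one iff x+1 ∉ set; zip the sorted
-- boundary lists); objective: alternative algorithm, same cost.

-- ===== PORT A =====
def pvMk (a b : Int) : String :=
  "[" ++ PySem.Int.toStr a ++ "_" ++ PySem.Int.toStr b ++ "]"

def find_intervals (numbers : List Int) : String :=
  let nums := PySem.List.sorted (PySem.Set.ofList numbers) (fun x => x) false
  match nums with
  | [] => ""
  | n0 :: tail =>
    let st := tail.foldl
      (fun (s : Int × Int × List String) n =>
        if n = s.2.1 + 1 then (s.1, n, s.2.2)
        else (n, n, s.2.2 ++ [pvMk s.1 s.2.1]))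
      (n0, n0, ([] : List String))
    PySem.Str.join "_" (st.2.2 ++ [pvMk st.1 st.2.1])

-- ===== PORT B =====
def find_intervals_alt (numbers : List Int) : String :=
  let s := PySem.Set.ofList numbers
  let starts := PySem.List.sorted (s.filter (fun x => !(PySem.Set.contains s (x - 1)))) (fun x => x) false
  let ends := PySem.List.sorted (s.filter (fun x => !(PySem.Set.contains s (x + 1)))) (fun x => x) false
  PySem.Str.join "_" ((starts.zip ends).map (fun p => pvMk p.1 p.2))

-- ===== PRECONDITION & SPEC =====
def Spec_find_intervals (numbers : List Int) (out : String) : Prop := out = find_intervals_alt numbers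
instance (numbers : List Int) (out : String) : Decidable (Spec_find_intervals numbers out) := by unfold Spec_find_intervals; infer_instance

-- ===== CLAIM (what is proved, stated in full; the proofs are below) =====
def Claim_equal_find_intervals : Prop := ∀ (numbers : List Int), Dom_find_intervals numbers → Spec_find_intervals numbers (find_intervals numbers)

-- ===== LEMMAS AND PROOFS =====

-- proof-side model: run peeling over the sorted dedup list
def pvRun (endv : Int) (rest : List Int) : Int × List Int :=
  match rest with
  | [] => (endv, [])
  | x :: xs => if x = endv + 1 then pvRun x xs else (endv, x :: xs)

theorem pvRun_len (endv : Int) (rest : List Int) :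
    (pvRun endv rest).2.length ≤ rest.length := by
  induction rest generalizing endv with
  | nil => simp [pvRun]
  | cons x xs ih =>
    simp only [pvRun]
    split
    · exact le_trans (ih x) (Nat.le_succ _)
    · simp

def pvLoop (rest : List Int) (parts : List String) : List String :=
  match rest with
  | [] => parts
  | x :: xs => pvLoop (pvRun x xs).2 (parts ++ [pvMk x (pvRun x xs).1])
termination_by rest.length
decreasing_by
  exact Nat.lt_succ_of_le (pvRun_len x xs)

theorem pvLoop_acc (rest : List Int) (parts : List String) :
    pvLoop rest parts = parts ++ pvLoop rest [] := by
  induction hn : rest.length using Nat.strong_induction_on generalizing rest parts with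
  | _ n ih =>
    match rest with
    | [] => simp [pvLoop]
    | x :: xs =>
      rw [pvLoop, pvLoop]
      have hlen : (pvRun x xs).2.length < n := by
        rw [← hn]; exact Nat.lt_succ_of_le (pvRun_len x xs)
      rw [ih _ hlen _ _ rfl, ih _ hlen (pvRun x xs).2 ([] ++ [pvMk x (pvRun x xs).1]) rfl]
      simp

-- A's fold, finished with the trailing append, equals acc ++ (run decomposition)
theorem pvFold_eq (tail : List Int) (start prev : Int) (acc : List String) :
    (let st := tail.foldl
      (fun (s : Int × Int × List String) n =>
        if n = s.2.1 + 1 then (s.1, n, s.2.2)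
        else (n, n, s.2.2 ++ [pvMk s.1 s.2.1]))
      (start, prev, acc)
     st.2.2 ++ [pvMk st.1 st.2.1])
    = acc ++ (pvMk start (pvRun prev tail).1 :: pvLoop (pvRun prev tail).2 []) := by
  induction tail generalizing start prev acc with
  | nil => simp [pvRun, pvLoop]
  | cons n tail ih =>
    simp only [List.foldl_cons]
    by_cases h : n = prev + 1
    · simp only [h, if_true]
      rw [ih]
      simp [pvRun]
    · rw [if_neg h]
      rw [ih]
      have : pvRun prev (n :: tail) = (prev, n :: tail) := by
        simp [pvRun, h]
      rw [this, pvLoop, pvLoop_acc _ ([] ++ [pvMk n (pvRun n tail).1])]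
      simp

-- the run peeled by pvRun on a strictly increasing list is exactly [x, x+1, …, e],
-- and every remaining element is ≥ e + 2
theorem pvRun_decomp (x : Int) (xs : List Int) (hpw : (x :: xs).Pairwise (· < ·)) :
    x ≤ (pvRun x xs).1 ∧
    x :: xs = (List.range (((pvRun x xs).1 - x).toNat + 1)).map (fun (i : Nat) => x + (i : Int))
              ++ (pvRun x xs).2 ∧
    ∀ y ∈ (pvRun x xs).2, (pvRun x xs).1 + 2 ≤ y := by
  induction xs generalizing x with
  | nil => simp [pvRun]
  | cons y ys ih =>
    by_cases h : y = x + 1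
    · have htail : (y :: ys).Pairwise (· < ·) := hpw.of_cons
      have hrun : pvRun x (y :: ys) = pvRun y ys := by simp [pvRun, h]
      obtain ⟨h1, h2, h3⟩ := ih y htail
      rw [hrun]
      refine ⟨by omega, ?_, h3⟩
      have hm : ((pvRun y ys).1 - x).toNat + 1 = (((pvRun y ys).1 - y).toNat + 1) + 1 := by
        omega
      rw [hm, List.range_succ_eq_map, List.map_cons, List.map_map]
      have : ((fun (i : Nat) => x + (i : Int)) ∘ Nat.succ) = (fun (i : Nat) => y + (i : Int)) := by
        funext i; simp [h, Function.comp]; ring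
      rw [this]
      simpa using congrArg (x :: ·) h2
    · have hrun : pvRun x (y :: ys) = (x, y :: ys) := by simp [pvRun, h]
      rw [hrun]
      refine ⟨le_rfl, by simp [List.range_succ], ?_⟩
      intro z hz
      have hxy : x < y := (List.pairwise_cons.mp hpw).1 y (by simp)
      rcases List.mem_cons.mp hz with rfl | hz'
      · omega
      · have hyz : y < z := (List.pairwise_cons.mp hpw.of_cons).1 z hz'
        omega

-- boundary characterization: the run peeling equals the zip of boundary filters
theorem pvZip (cur : List Int) (hpw : cur.Pairwise (· < ·)) :
    pvLoop cur [] =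
      ((cur.filter (fun y => decide ((y - 1) ∉ cur))).zip
        (cur.filter (fun y => decide ((y + 1) ∉ cur)))).map (fun p => pvMk p.1 p.2) := by
  induction hn : cur.length using Nat.strong_induction_on generalizing cur with
  | _ n ih =>
    match cur with
    | [] => simp [pvLoop]
    | x :: xs =>
      obtain ⟨hle, hdec, hrest⟩ := pvRun_decomp x xs hpw
      set e := (pvRun x xs).1 with he
      set rest := (pvRun x xs).2 with hr
      set run := (List.range ((e - x).toNat + 1)).map (fun (i : Nat) => x + (i : Int)) with hrundef
      have hmem_run : ∀ y, y ∈ run → x ≤ y ∧ y ≤ e := by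
        intro y hy
        rw [hrundef] at hy
        simp only [List.mem_map, List.mem_range] at hy
        obtain ⟨i, hi, rfl⟩ := hy
        omega
      have hmem_run' : ∀ y : Int, x ≤ y → y ≤ e → y ∈ run := by
        intro y h1 h2
        rw [hrundef]
        simp only [List.mem_map, List.mem_range]
        exact ⟨(y - x).toNat, by omega, by omega⟩
      have hcur : x :: xs = run ++ rest := hdec
      -- every element of cur is ≥ x
      have hmin : ∀ y ∈ x :: xs, x ≤ y := by
        intro y hy
        rw [hcur, List.mem_append] at hy
        rcases hy with hy | hy
        · exact (hmem_run y hy).1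
        · have := hrest y hy; omega
      -- START filter: run contributes [x]
      have hSrun : run.filter (fun y => decide ((y - 1) ∉ x :: xs)) = [x] := by
        have hx1 : (x - 1) ∉ x :: xs := by
          intro hc; have := hmin _ hc; omega
        rw [hrundef, List.range_succ_eq_map, List.map_cons, List.filter_cons]
        simp only [Nat.cast_zero, add_zero, hx1, not_false_iff, decide_true]
        rw [List.filter_eq_nil_iff.mpr ?_]
        · simp
        · intro a ha
          simp only [List.map_map, List.mem_map, List.mem_range] at ha
          obtain ⟨i, hi, rfl⟩ := ha
          simp only [Function.comp, decide_eq_true_eq, not_not]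
          have : (x + ((Nat.succ i : Nat) : Int)) - 1 ∈ run := by
            apply hmem_run' <;> push_cast <;> omega
          rw [hcur, List.mem_append]
          exact Or.inl this
      -- END filter: run contributes [e]
      have hErun : run.filter (fun y => decide ((y + 1) ∉ x :: xs)) = [e] := by
        have he1 : (e + 1) ∉ x :: xs := by
          rw [hcur, List.mem_append]
          rintro (hc | hc)
          · have := hmem_run _ hc; omega
          · have := hrest _ hc; omega
        rw [hrundef, List.range_succ, List.map_append, List.filter_append]
        rw [List.filter_eq_nil_iff.mpr ?_]
        · simp only [List.map_cons, List.map_nil, List.filter_cons, List.filter_nil,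
            List.nil_append]
          have hcast : x + (((e - x).toNat : Nat) : Int) = e := by omega
          rw [hcast]
          simp [he1]
        · intro a ha
          simp only [List.mem_map, List.mem_range] at ha
          obtain ⟨i, hi, rfl⟩ := ha
          simp only [decide_eq_true_eq, not_not]
          have : (x + (i : Int)) + 1 ∈ run := by
            apply hmem_run' <;> omega
          rw [hcur, List.mem_append]
          exact Or.inl this
      -- rest filters are local: for y ∈ rest the boundary tests in cur and in rest agree
      have hSrest : rest.filter (fun y => decide ((y - 1) ∉ x :: xs))
          = rest.filter (fun y => decide ((y - 1) ∉ rest)) := by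
        apply List.filter_congr
        intro y hy
        have hyb := hrest y hy
        have : ((y - 1) ∈ x :: xs) ↔ ((y - 1) ∈ rest) := by
          rw [hcur, List.mem_append]
          constructor
          · rintro (hc | hc)
            · have := hmem_run _ hc; omega
            · exact hc
          · exact Or.inr
        simp [this]
      have hErest : rest.filter (fun y => decide ((y + 1) ∉ x :: xs))
          = rest.filter (fun y => decide ((y + 1) ∉ rest)) := by
        apply List.filter_congr
        intro y hy
        have hyb := hrest y hy
        have : ((y + 1) ∈ x :: xs) ↔ ((y + 1) ∈ rest) := by
          rw [hcur, List.mem_append]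
          constructor
          · rintro (hc | hc)
            · have := hmem_run _ hc; omega
            · exact hc
          · exact Or.inr
        simp [this]
      have hpw_rest : rest.Pairwise (· < ·) := by
        have := hcur ▸ hpw
        exact (List.pairwise_append.mp this).2.1
      have hlen_rest : rest.length < n := by
        rw [← hn]
        exact Nat.lt_succ_of_le (pvRun_len x xs)
      -- assemble
      have hfilterS : (x :: xs).filter (fun y => decide ((y - 1) ∉ x :: xs))
          = x :: rest.filter (fun y => decide ((y - 1) ∉ rest)) := by
        rw [hcur]
        rw [List.filter_append]
        rw [← hcur, hSrun, hSrest]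
        rfl
      have hfilterE : (x :: xs).filter (fun y => decide ((y + 1) ∉ x :: xs))
          = e :: rest.filter (fun y => decide ((y + 1) ∉ rest)) := by
        rw [hcur]
        rw [List.filter_append]
        rw [← hcur, hErun, hErest]
        rfl
      rw [hfilterS, hfilterE, List.zip_cons_cons, List.map_cons]
      rw [pvLoop, pvLoop_acc]
      rw [ih rest.length hlen_rest rest hpw_rest rfl]
      simp
      rw [he]

-- bridge: the port's boolean tests equal the proof-side membership tests on nums
theorem pvFilter_bridge (numbers : List Int) (d : Int) :
    (PySem.List.sorted (PySem.Set.ofList numbers) (fun x => x) false).filter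
        (fun y => decide ((y + d) ∉ PySem.List.sorted (PySem.Set.ofList numbers) (fun x => x) false))
      = PySem.List.sorted
          ((PySem.Set.ofList numbers).filter
            (fun x => !(PySem.Set.contains (PySem.Set.ofList numbers) (x + d))))
          (fun x => x) false := by
  set s := PySem.Set.ofList numbers with hs
  set nums := PySem.List.sorted s (fun x => x) false with hnums
  have hperm : nums.Perm s := PySem.List.sorted_perm ..
  have hmemeq : ∀ y : Int, (y ∈ nums) ↔ PySem.Set.contains s y = true := by
    intro y
    rw [hnums, PySem.List.mem_sorted, PySem.Set.contains_iff]
  -- rewrite the port's predicate into the membership predicate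
  have hpred : ∀ l : List Int,
      l.filter (fun x => !(PySem.Set.contains s (x + d)))
        = l.filter (fun y => decide ((y + d) ∉ nums)) := by
    intro l
    apply List.filter_congr
    intro y _
    by_cases h : (y + d) ∈ nums
    · have hc : PySem.Set.contains s (y + d) = true := (hmemeq _).mp h
      rw [hc]; simp [h]
    · have hc : PySem.Set.contains s (y + d) = false := by
        rcases Bool.eq_false_or_eq_true (PySem.Set.contains s (y + d)) with hb | hb
        · exact absurd ((hmemeq (y + d)).mpr hb) h
        · exact hb
      rw [hc]; simp [h]
  rw [hpred]
  symm
  apply PySem.List.sorted_eq_of_perm_of_pairwise_lt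
  · exact hperm.filter _
  · exact List.Pairwise.filter _ (by rw [hnums, hs]; exact PySem.List.sorted_ofList_pairwise_lt ..)

-- A's code computes the run-peeling join
theorem pvA_eq (numbers : List Int) :
    find_intervals numbers = PySem.Str.join "_"
      (pvLoop (PySem.List.sorted (PySem.Set.ofList numbers) (fun x => x) false) []) := by
  unfold find_intervals
  cases h : PySem.List.sorted (PySem.Set.ofList numbers) (fun x => x) false with
  | nil => simp [pvLoop, PySem.Str.join]
  | cons n0 tail =>
    simp only []
    rw [pvFold_eq tail n0 n0 []]
    rw [pvLoop]
    rw [pvLoop_acc (pvRun n0 tail).2 ([] ++ [pvMk n0 (pvRun n0 tail).1])]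
    simp

-- ===== VERDICT (by name: the statement is the Claim_ definition above) =====
theorem find_intervals_spec : Claim_equal_find_intervals := by
  intro numbers _
  unfold Spec_find_intervals
  rw [pvA_eq]
  have hS := pvFilter_bridge numbers (-1)
  simp only [show ∀ y : Int, y + (-1) = y - 1 from fun y => by ring] at hS
  have hE := pvFilter_bridge numbers 1
  have hpw : (PySem.List.sorted (PySem.Set.ofList numbers) (fun x => x) false).Pairwise (· < ·) :=
    PySem.List.sorted_ofList_pairwise_lt ..
  rw [pvZip _ hpw, hS, hE]
  rfl
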